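-- pv_equiv track=rewrite | github.com/jurinho17-sv/The-Structure-and-Interpretation-of-Computer-Programs-Fall2025 | projects/hog/hog.py | sus_points
-- ===== SOURCE A (Python) =====
-- def is_prime(n):
--     """Return whether N is prime."""
--     if n == 1:
--         return False
--     k = 2
--     while k < n:
--         if n % k == 0:
--             return False
--         k += 1
--     return True
--
-- def num_factors(n):
--     """Return the number of factors of N, including 1 and N itself."""
--     # BEGIN PROBLEM 4
--     "*** YOUR CODE HERE ***"
--     candidate_of_factors = 1
--     num_of_factors = 0
--     while candidate_of_factors <= n:
--         if n % candidate_of_factors == 0: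
--             num_of_factors += 1
--         candidate_of_factors += 1
--     return num_of_factors
--
-- def sus_points(score):
--     """Return the new score of a player taking into account the Sus Fuss rule."""
--     # BEGIN PROBLEM 4
--     "*** YOUR CODE HERE ***"
--     factors = num_factors(score)
--     if factors == 3 or factors == 4:
--         n = score + 1
--         while True:
--             if is_prime(n): # is_prime returns True/False
--                 return n
--             n += 1
--     else:
--         return score # return original score is not sus
-- ===== SOURCE B (Python) =====
-- def _is_prime_sqrt(n):
--     if n < 2:
--         return False
--     i = 2
--     while i * i <= n:
--         if n % i == 0:
--             return False
--         i += 1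
--     return True
--
-- def sus_points(score):
--     """Return the new score of a player taking into account the Sus Fuss rule."""
--     count = 0
--     i = 1
--     while i * i <= score:
--         if score % i == 0:
--             count += 2
--             if i * i == score:
--                 count -= 1
--         i += 1
--     if count == 3 or count == 4:
--         n = score + 1
--         while not _is_prime_sqrt(n):
--             n += 1
--         return n
--     return score
-- ===== Notes on version B (the rewrite author's own statement) =====
-- stated objective: faster
-- what changed: Divisors are counted in pairs (i, n/i) with a single loop up to sqrt(score) and a perfect-square correction, and primality of candidates is tested by trial division only up to sqrt(n), instead of scanning every value 1..n for factors and 2..n-1 for primality.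
import Mathlib
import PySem

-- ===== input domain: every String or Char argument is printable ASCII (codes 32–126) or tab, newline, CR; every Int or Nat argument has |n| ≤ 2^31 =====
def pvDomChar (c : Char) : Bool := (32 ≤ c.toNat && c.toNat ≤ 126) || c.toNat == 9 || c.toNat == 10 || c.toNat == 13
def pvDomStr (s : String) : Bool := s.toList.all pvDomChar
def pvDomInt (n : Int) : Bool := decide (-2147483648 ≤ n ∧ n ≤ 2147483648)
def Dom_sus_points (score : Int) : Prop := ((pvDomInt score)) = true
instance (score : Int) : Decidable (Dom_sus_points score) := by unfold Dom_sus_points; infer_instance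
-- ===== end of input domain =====

-- B replaces A's 1..n divisor scan by a paired count up to √n and A's 2..n-1 trial
-- division by one up to √n (objective: faster, asymptotically fewer loop iterations).
-- Both 'while True' next-prime searches are ported with a fuel guard for totality only.

-- ===== PORT A =====
-- num_factors' while loop: candidate_of_factors = c, num_of_factors = acc
def numFactorsLoop (n c acc : Int) : Int :=
  if _h : c ≤ n then
    numFactorsLoop n (c + 1) (if n % c = 0 then acc + 1 else acc)
  else acc
termination_by (n + 1 - c).toNat
decreasing_by omega

-- is_prime's while loop
def isPrimeLoopA (n k : Int) : Bool :=
  if _h : k < n then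
    if n % k = 0 then false else isPrimeLoopA n (k + 1)
  else true
termination_by (n - k).toNat
decreasing_by omega

def is_prime (n : Int) : Bool := if n = 1 then false else isPrimeLoopA n 2

-- the 'while True' search; fuel is a totality guard only (never exhausted on inputs reached)
def searchA (fuel : Nat) (n : Int) : Int :=
  match fuel with
  | 0 => n
  | f + 1 => if is_prime n then n else searchA f (n + 1)

def sus_points (score : Int) : Int :=
  let factors := numFactorsLoop score 1 0
  if factors = 3 ∨ factors = 4 then searchA (2 * score + 4).toNat (score + 1)
  else score

-- ===== PORT B =====
-- _is_prime_sqrt's while loop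
def isPrimeLoopB (n i : Int) : Bool :=
  if _h : i * i ≤ n then
    if n % i = 0 then false else isPrimeLoopB n (i + 1)
  else true
termination_by (n + 1 - i).toNat
decreasing_by
  have : i ≤ n := by nlinarith
  omega

def is_prime_sqrt (n : Int) : Bool := if n < 2 then false else isPrimeLoopB n 2

-- B's paired divisor-count loop
def countDivLoop (n i count : Int) : Int :=
  if _h : i * i ≤ n then
    countDivLoop n (i + 1)
      (if n % i = 0 then (if i * i = n then count + 2 - 1 else count + 2) else count)
  else count
termination_by (n + 1 - i).toNat
decreasing_by
  have : i ≤ n := by nlinarith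
  omega

-- B's 'while not _is_prime_sqrt(n)' search; same totality fuel guard
def searchB (fuel : Nat) (n : Int) : Int :=
  match fuel with
  | 0 => n
  | f + 1 => if is_prime_sqrt n then n else searchB f (n + 1)

def sus_points_alt (score : Int) : Int :=
  let count := countDivLoop score 1 0
  if count = 3 ∨ count = 4 then searchB (2 * score + 4).toNat (score + 1)
  else score

-- ===== PRECONDITION & SPEC =====
def Spec_sus_points (score : Int) (out : Int) : Prop := out = sus_points_alt score
instance (score : Int) (out : Int) : Decidable (Spec_sus_points score out) := by unfold Spec_sus_points; infer_instance

-- ===== CLAIM (what is proved, stated in full; the proofs are below) =====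
def Claim_equal_sus_points : Prop := ∀ (score : Int), Dom_sus_points score → Spec_sus_points score (sus_points score)

-- ===== LEMMAS AND PROOFS =====

theorem numFactorsLoop_inv (n c acc : Int) :
    numFactorsLoop n c acc =
      acc + (((Finset.Icc c n).filter (fun d => n % d = 0)).card : Int) := by
  induction c, acc using numFactorsLoop.induct n with
  | case1 c acc h ih =>
    rw [numFactorsLoop]; simp only [h, dite_true]
    simp only [dite_eq_ite] at ih
    rw [ih]
    have hicc : Finset.Icc c n = insert c (Finset.Icc (c+1) n) := by
      ext x; simp [Finset.mem_Icc, Finset.mem_insert]; omega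
    have hnot : c ∉ (Finset.Icc (c+1) n).filter (fun d => n % d = 0) := by
      simp [Finset.mem_Icc]
    rw [hicc, Finset.filter_insert]
    by_cases hm : n % c = 0 <;> simp [hm, Finset.card_insert_of_notMem hnot] <;> ring
  | case2 c acc h =>
    rw [numFactorsLoop]; simp only [h, dite_false]
    rw [Finset.Icc_eq_empty (by omega)]
    simp

theorem countDivLoop_inv (n i count : Int) (h : 1 ≤ i) :
    countDivLoop n i count =
      count + ∑ j ∈ (Finset.Icc i n).filter (fun j => j * j ≤ n),
        (if n % j = 0 then (if j * j = n then (1 : Int) else 2) else 0) := by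
  revert h
  induction i, count using countDivLoop.induct n with
  | case1 i count h ih =>
    intro h1
    rw [countDivLoop]; simp only [h, dite_true]
    simp only [dite_eq_ite] at ih
    rw [ih (by omega)]
    have hin : i ≤ n := by nlinarith
    have hicc : (Finset.Icc i n).filter (fun j => j * j ≤ n)
        = insert i ((Finset.Icc (i+1) n).filter (fun j => j * j ≤ n)) := by
      ext x; simp only [Finset.mem_filter, Finset.mem_Icc, Finset.mem_insert]
      constructor
      · rintro ⟨⟨hx1, hx2⟩, hx3⟩
        by_cases hxi : x = i
        · exact Or.inl hxi
        · exact Or.inr ⟨⟨by omega, hx2⟩, hx3⟩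
      · rintro (rfl | ⟨⟨hx1, hx2⟩, hx3⟩)
        · exact ⟨⟨le_refl _, hin⟩, h⟩
        · exact ⟨⟨by omega, hx2⟩, hx3⟩
    have hnot : i ∉ (Finset.Icc (i+1) n).filter (fun j => j * j ≤ n) := by
      simp [Finset.mem_Icc]
    rw [hicc, Finset.sum_insert hnot]
    by_cases hm : n % i = 0 <;> by_cases hsq : i * i = n <;> simp [hm, hsq] <;> ring
  | case2 i count h =>
    intro h1
    rw [countDivLoop]; simp only [h, dite_false]
    have : (Finset.Icc i n).filter (fun j => j * j ≤ n) = ∅ := by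
      apply Finset.filter_eq_empty_iff.mpr
      intro x hx
      simp only [Finset.mem_Icc] at hx
      nlinarith
    rw [this]; simp

theorem counts_eq (n : Int) : numFactorsLoop n 1 0 = countDivLoop n 1 0 := by
  rw [numFactorsLoop_inv, countDivLoop_inv n 1 0 (le_refl 1)]
  simp only [zero_add]
  by_cases hn : 1 ≤ n
  · -- rewrite the sum as a sum over the set of small divisors
    set L : Finset Int := (Finset.Icc 1 n).filter (fun d => n % d = 0 ∧ d * d ≤ n) with hL
    have hstep1 : ∑ j ∈ (Finset.Icc 1 n).filter (fun j => j * j ≤ n),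
        (if n % j = 0 then (if j * j = n then (1 : Int) else 2) else 0)
        = ∑ d ∈ L, (if d * d = n then (1 : Int) else 2) := by
      rw [hL, ← Finset.sum_filter, Finset.filter_filter]
      apply Finset.sum_congr
      · apply Finset.filter_congr; intro x _; simp [and_comm]
      · intro x _; rfl
    rw [hstep1]
    have hstep2 : ∑ d ∈ L, (if d * d = n then (1 : Int) else 2)
        = (L.card : Int) + ((L.filter (fun d => ¬ d * d = n)).card : Int) := by
      have : ∀ d ∈ L, (if d * d = n then (1 : Int) else 2)
          = 1 + (if ¬ d * d = n then (1 : Int) else 0) := by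
        intro d _; by_cases h : d * d = n <;> simp [h]
      rw [Finset.sum_congr rfl this, Finset.sum_add_distrib, Finset.sum_const,
        Finset.sum_boole]
      simp
    rw [hstep2]
    -- split the full divisor set by d*d ≤ n
    have hsplit : (((Finset.Icc 1 n).filter (fun d => n % d = 0)).filter
          (fun d => d * d ≤ n)).card
        + (((Finset.Icc 1 n).filter (fun d => n % d = 0)).filter
          (fun d => ¬ d * d ≤ n)).card
        = ((Finset.Icc 1 n).filter (fun d => n % d = 0)).card :=
      Finset.filter_card_add_filter_neg_card_eq_card (fun d => d * d ≤ n)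
    have hLeq : ((Finset.Icc 1 n).filter (fun d => n % d = 0)).filter
          (fun d => d * d ≤ n) = L := by
      rw [hL, Finset.filter_filter]
    -- the big divisors biject with the small divisors whose square is below n
    have hbij : (((Finset.Icc 1 n).filter (fun d => n % d = 0)).filter
          (fun d => ¬ d * d ≤ n)).card
        = (L.filter (fun d => ¬ d * d = n)).card := by
      apply Finset.card_bij (fun d _ => n / d)
      · intro a ha
        simp only [Finset.mem_filter, Finset.mem_Icc] at ha
        obtain ⟨⟨⟨ha1, han⟩, hamod⟩, hasq⟩ := ha
        have hdvd : a ∣ n := Int.dvd_of_emod_eq_zero hamod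
        have hmul : a * (n / a) = n := Int.mul_ediv_cancel' hdvd
        have hm1 : 1 ≤ n / a := by nlinarith [hmul]
        have hmd : n / a < a := by nlinarith [hmul]
        have hmm : (n / a) * (n / a) < n := by nlinarith [hmul]
        have hmdvd : (n / a) ∣ n := ⟨a, by linarith [hmul, mul_comm a (n / a)]⟩
        simp only [hL, Finset.mem_filter, Finset.mem_Icc]
        refine ⟨⟨⟨hm1, by nlinarith [hmul]⟩, Int.emod_eq_zero_of_dvd hmdvd, by linarith⟩, by intro hc; omega⟩
      · intro a1 ha1 a2 ha2 heq
        simp only [Finset.mem_filter, Finset.mem_Icc] at ha1 ha2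
        have hd1 : a1 ∣ n := Int.dvd_of_emod_eq_zero ha1.1.2
        have hd2 : a2 ∣ n := Int.dvd_of_emod_eq_zero ha2.1.2
        have hmul1 : a1 * (n / a1) = n := Int.mul_ediv_cancel' hd1
        have hmul2 : a2 * (n / a2) = n := Int.mul_ediv_cancel' hd2
        have hm1 : 1 ≤ n / a1 := by nlinarith [hmul1]
        rw [heq] at hmul1
        have : a1 * (n / a2) = a2 * (n / a2) := by rw [hmul1, hmul2]
        have hne : n / a2 ≠ 0 := by rw [← heq]; omega
        exact mul_right_cancel₀ hne this
      · intro b hb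
        simp only [hL, Finset.mem_filter, Finset.mem_Icc] at hb
        obtain ⟨⟨⟨hb1, hbn⟩, hbmod, hbsq⟩, hbne⟩ := hb
        have hbsq' : b * b < n := lt_of_le_of_ne hbsq hbne
        have hdvd : b ∣ n := Int.dvd_of_emod_eq_zero hbmod
        have hmul : b * (n / b) = n := Int.mul_ediv_cancel' hdvd
        have ha1 : 1 ≤ n / b := by nlinarith [hmul]
        have hba : b < n / b := by nlinarith [hmul]
        have hadvd : (n / b) ∣ n := ⟨b, by linarith [hmul, mul_comm b (n / b)]⟩
        refine ⟨n / b, ?_, ?_⟩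
        · simp only [Finset.mem_filter, Finset.mem_Icc]
          refine ⟨⟨⟨ha1, by nlinarith [hmul]⟩, Int.emod_eq_zero_of_dvd hadvd⟩, ?_⟩
          intro hc; nlinarith [hmul]
        · have hne : n / b ≠ 0 := by omega
          nth_rewrite 1 [← hmul]
          exact Int.mul_ediv_cancel _ hne
    rw [← hsplit, hLeq, hbij]
    push_cast
    ring
  · -- n ≤ 0 : both sides are empty
    rw [Finset.Icc_eq_empty (by omega)]
    simp

theorem isPrimeLoopA_inv (n k : Int) :
    isPrimeLoopA n k = true ↔ ∀ j, k ≤ j → j < n → n % j ≠ 0 := by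
  induction k using isPrimeLoopA.induct n with
  | case1 k hk hm =>
    rw [isPrimeLoopA]
    simp only [hk, dite_true, hm, if_true]
    constructor
    · intro h; exact absurd h (by simp)
    · intro h; exact absurd hm (h k (le_refl k) hk)
  | case2 k hk hm ih =>
    rw [isPrimeLoopA]
    simp only [hk, dite_true, hm, if_false, ite_false]
    rw [ih]
    constructor
    · intro h j hj1 hj2
      rcases eq_or_lt_of_le hj1 with rfl | hlt
      · exact hm
      · exact h j (by omega) hj2
    · intro h j hj1 hj2; exact h j (by omega) hj2
  | case3 k hk =>
    rw [isPrimeLoopA]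
    simp only [hk, dite_false]
    constructor
    · intro _ j hj1 hj2; omega
    · intro _; trivial

theorem isPrimeLoopB_inv (n i : Int) (h : 1 ≤ i) :
    isPrimeLoopB n i = true ↔ ∀ j, i ≤ j → j * j ≤ n → n % j ≠ 0 := by
  revert h
  induction i using isPrimeLoopB.induct n with
  | case1 i hi hm =>
    rw [isPrimeLoopB]
    simp only [hi, dite_true, hm, if_true]
    intro h1
    constructor
    · intro h; exact absurd h (by simp)
    · intro h; exact absurd hm (h i (le_refl i) hi)
  | case2 i hi hm ih =>
    rw [isPrimeLoopB]
    simp only [hi, dite_true, hm, if_false, ite_false]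
    intro h1
    rw [ih (by omega)]
    constructor
    · intro h j hj1 hj2
      rcases eq_or_lt_of_le hj1 with rfl | hlt
      · exact hm
      · exact h j (by omega) hj2
    · intro h j hj1 hj2; exact h j (by omega) hj2
  | case3 i hi =>
    rw [isPrimeLoopB]
    simp only [hi, dite_false]
    intro h1
    constructor
    · intro _ j hj1 hj2
      have : i * i ≤ j * j := by nlinarith
      nlinarith
    · intro _; trivial

theorem prime_agree (n : Int) (h : 2 ≤ n) : is_prime n = is_prime_sqrt n := by
  have hne1 : n ≠ 1 := by omega
  have hlt2 : ¬ n < 2 := by omega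
  rw [is_prime, is_prime_sqrt]
  simp only [hne1, hlt2, if_false, ite_false]
  rw [Bool.eq_iff_iff, isPrimeLoopA_inv n 2, isPrimeLoopB_inv n 2 (by norm_num)]
  constructor
  · intro hall j hj1 hj2
    exact hall j hj1 (by nlinarith)
  · intro hball j hj1 hj2 hmod
    by_cases hsq : j * j ≤ n
    · exact hball j hj1 hsq hmod
    · -- j is a big divisor: its cofactor n / j is a small one
      have hdvd : j ∣ n := Int.dvd_of_emod_eq_zero hmod
      have hmul : j * (n / j) = n := Int.mul_ediv_cancel' hdvd
      have hm1 : 1 ≤ n / j := by nlinarith [hmul]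
      have hm2 : 2 ≤ n / j := by
        rcases eq_or_lt_of_le hm1 with he | hlt
        · exfalso; rw [← he] at hmul; omega
        · omega
      have hmd : n / j < j := by nlinarith [hmul]
      have hmm : (n / j) * (n / j) ≤ n := by nlinarith [hmul]
      have hmdvd : (n / j) ∣ n := ⟨j, by linarith [hmul, mul_comm j (n / j)]⟩
      exact hball (n / j) hm2 hmm (Int.emod_eq_zero_of_dvd hmdvd)

theorem search_agree (fuel : Nat) (n : Int) (h : 2 ≤ n) :
    searchA fuel n = searchB fuel n := by
  induction fuel generalizing n with
  | zero => rfl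
  | succ f ih =>
    rw [searchA, searchB, prime_agree n h]
    by_cases hp : is_prime_sqrt n = true
    · simp [hp]
    · simp only [Bool.not_eq_true] at hp
      simp [hp]
      exact ih (n + 1) (by omega)

-- ===== VERDICT (by name: the statement is the Claim_ definition above) =====
theorem sus_points_spec : Claim_equal_sus_points := by
  intro score _
  unfold Spec_sus_points sus_points sus_points_alt
  rw [counts_eq score]
  set c := countDivLoop score 1 0 with hc
  by_cases hcond : c = 3 ∨ c = 4
  · simp only [hcond, if_true]
    have hs1 : 1 ≤ score := by
      by_contra hs
      have : countDivLoop score 1 0 = 0 := by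
        rw [countDivLoop_inv score 1 0 (le_refl 1)]
        rw [Finset.Icc_eq_empty (by omega)]
        simp
      rw [hc, this] at hcond
      omega
    exact search_agree _ (score + 1) (by omega)
  · simp only [hcond, if_false]
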